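-- pv_equiv track=rewrite | github.com/MontyOharra/eto_js | eto_server/src/services/pipeline_analysis.py | _find_required_modules
-- ===== SOURCE A (Python) =====
-- from typing import Dict, List, Tuple, Set, Any, Optional
-- from collections import defaultdict, deque
--
-- def _find_required_modules(
--
--     dependency_graph: Dict[str, Dict],
--     target_module_id: str
-- ) -> Set[str]:
--     """
--     Find all modules required to reach the target module using BFS
--     """
--     required = set()
--     queue = deque([target_module_id])
--     visited = set()
--
--     while queue:
--         current = queue.popleft()
--         if current in visited:
--             continue
--
--         visited.add(current)
--         required.add(current)
--
--         # Add all dependencies of current module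
--         dependencies = dependency_graph['dependencies'].get(current, set())
--         for dep in dependencies:
--             if dep not in visited:
--                 queue.append(dep)
--
--     return required
-- ===== SOURCE B (Python) =====
-- def _find_required_modules(
--     dependency_graph,
--     target_module_id
-- ):
--     """Recursive depth-first traversal: visit(node) marks node required and
--     recurses into its dependencies; no queue and no separate visited set."""
--     dependencies = dependency_graph['dependencies']
--     required = set()
--
--     def visit(node):
--         if node in required:
--             return
--         required.add(node)
--         for dep in dependencies.get(node, set()):
--             visit(dep)
--
--     visit(target_module_id)
--     return required
-- ===== Notes on version B (the rewrite author's own statement) =====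
-- stated objective: alternative
-- what changed: The iterative BFS (deque worklist plus separate visited and required sets) is replaced by a recursive depth-first traversal: an inner visit(node) returns early on already-required nodes, marks the node and recurses over its dependencies; the returned set of reachable modules is the same though the traversal order differs.
import Mathlib
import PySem

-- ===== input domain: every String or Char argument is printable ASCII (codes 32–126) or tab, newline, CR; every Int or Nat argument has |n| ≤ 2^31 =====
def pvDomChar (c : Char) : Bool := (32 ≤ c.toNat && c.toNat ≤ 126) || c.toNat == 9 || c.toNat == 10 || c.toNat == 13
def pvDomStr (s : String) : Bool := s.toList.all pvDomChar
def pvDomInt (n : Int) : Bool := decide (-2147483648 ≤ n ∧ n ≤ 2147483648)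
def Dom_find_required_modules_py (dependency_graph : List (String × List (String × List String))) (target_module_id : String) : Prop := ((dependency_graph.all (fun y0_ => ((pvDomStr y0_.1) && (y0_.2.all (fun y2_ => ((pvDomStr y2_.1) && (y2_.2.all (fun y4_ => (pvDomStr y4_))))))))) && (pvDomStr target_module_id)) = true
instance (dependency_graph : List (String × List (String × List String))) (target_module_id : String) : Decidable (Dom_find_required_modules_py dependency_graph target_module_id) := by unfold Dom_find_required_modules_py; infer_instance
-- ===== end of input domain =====

-- B replaces A's iterative BFS (deque + visited/required sets) by a recursive depth-first
-- traversal; the returned SET of reachable modules is the same. Python returns a set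
-- (unordered); both ports present that set value canonically as the sorted list of its
-- distinct elements ("alternative", not claimed faster).

-- lemma cited by both ports' termination proofs: every dependency list handed out by
-- the dict lies inside the flattening of all its values
theorem pvMemGetD (l : List (String × List String)) (k x : String)
    (h : x ∈ (PySem.Dict.mk l).getD k []) : x ∈ (l.map Prod.snd).flatten := by
  induction l with
  | nil =>
    rw [show (PySem.Dict.mk ([] : List (String × List String))).getD k [] = [] from rfl] at h
    exact absurd h (List.not_mem_nil)
  | cons p rest ih =>
    rw [PySem.Dict.getD_eq_get?_getD, PySem.Dict.get?_mk_cons] at h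
    by_cases hk : (p.1 == k) = true
    · simp only [hk, if_pos, Option.getD_some] at h
      simp only [List.map_cons, List.flatten_cons, List.mem_append]
      exact Or.inl h
    · rw [if_neg hk, ← PySem.Dict.getD_eq_get?_getD] at h
      simp only [List.map_cons, List.flatten_cons, List.mem_append]
      exact Or.inr (ih h)

-- ===== PORT A =====
-- the while-loop of A: FIFO queue, visited and required sets
def pvLoopA (dd : List (String × List String)) :
    List String → PySem.Set String → PySem.Set String → PySem.Set String
  | [], _, required => required
  | current :: queue, visited, required =>
    if PySem.Set.contains visited current then
      pvLoopA dd queue visited required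
    else
      let visited' := PySem.Set.add visited current
      let required' := PySem.Set.add required current
      let deps := (PySem.Dict.mk dd).getD current []
      pvLoopA dd (queue ++ deps.filter (fun d => !(PySem.Set.contains visited' d)))
        visited' required'
  termination_by queue visited _ =>
    (((((dd.map Prod.snd).flatten) ++ queue).toFinset \ visited.toFinset).card, queue.length)
  decreasing_by
  · rename_i h
    have hc : current ∈ visited := by simpa using h
    have hfs : (((dd.map Prod.snd).flatten ++ queue).toFinset \ visited.toFinset)
        = (((dd.map Prod.snd).flatten ++ (current :: queue)).toFinset \ visited.toFinset) := by
      ext x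
      simp only [Finset.mem_sdiff, List.mem_toFinset, List.mem_append, List.mem_cons]
      constructor
      · rintro ⟨hx, hv⟩
        exact ⟨by tauto, hv⟩
      · rintro ⟨hx, hv⟩
        refine ⟨?_, hv⟩
        rcases hx with h1 | h2 | h3
        · exact Or.inl h1
        · exact absurd (h2 ▸ hc) hv
        · exact Or.inr h3
    rw [hfs]
    exact Prod.Lex.right _ (by simp)
  · rename_i h
    have hc : current ∉ visited := fun hm => h (by simpa using hm)
    apply Prod.Lex.left
    apply Finset.card_lt_card
    rw [PySem.Set.add_of_not_mem hc]
    refine (Finset.ssubset_iff_of_subset ?_).mpr ⟨current, ?_, ?_⟩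
    · intro x hx
      simp only [Finset.mem_sdiff, List.mem_toFinset, List.mem_append, List.mem_cons] at hx ⊢
      rcases hx with ⟨hx1, hx2⟩
      refine ⟨?_, fun hxv => hx2 (Or.inl hxv)⟩
      rcases hx1 with h1 | h2 | h3
      · exact Or.inl h1
      · exact Or.inr (Or.inr h2)
      · exact Or.inl (pvMemGetD dd current x (List.mem_of_mem_filter h3))
    · simp only [Finset.mem_sdiff, List.mem_toFinset, List.mem_append, List.mem_cons]
      exact ⟨by tauto, hc⟩
    · simp only [Finset.mem_sdiff, List.mem_toFinset, List.mem_append, List.mem_cons,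
        not_and, not_not]
      intro _
      tauto

def find_required_modules_py (dependency_graph : List (String × List (String × List String))) (target_module_id : String) : List String :=
  -- dependency_graph['dependencies'] raises KeyError when the key is absent: excluded by Pre_
  let dd := (PySem.Dict.mk dependency_graph).getD "dependencies" []
  -- the Python value is a SET: presented as the sorted list of its distinct elements
  PySem.List.sorted (pvLoopA dd [target_module_id] PySem.Set.empty PySem.Set.empty)
    (fun x => x) false

-- ===== PORT B =====
-- B's recursive visit(): depth-first, stack of pending nodes processed head-first;
-- the subtype carries 'visited only grows', which the termination argument needs
def pvDfs (dd : List (String × List String)) :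
    (stack : List String) → (vis : PySem.Set String) → {v : PySem.Set String // ∀ x ∈ vis, x ∈ v}
  | [], vis => ⟨vis, fun _ h => h⟩
  | n :: rest, vis =>
    if h : PySem.Set.contains vis n then
      pvDfs dd rest vis
    else
      let inner := pvDfs dd ((PySem.Dict.mk dd).getD n []) (PySem.Set.add vis n)
      let outer := pvDfs dd rest inner.val
      ⟨outer.val, fun x hx =>
        outer.property x (inner.property x ((PySem.Set.mem_add _ _ _).mpr (Or.inl hx)))⟩
  termination_by stack vis =>
    ((((dd.map Prod.snd).flatten ++ stack).toFinset \ vis.toFinset).card, stack.length)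
  decreasing_by
  · have hc : n ∈ vis := by simpa using h
    have hfs : (((dd.map Prod.snd).flatten ++ rest).toFinset \ vis.toFinset)
        = (((dd.map Prod.snd).flatten ++ (n :: rest)).toFinset \ vis.toFinset) := by
      ext x
      simp only [Finset.mem_sdiff, List.mem_toFinset, List.mem_append, List.mem_cons]
      constructor
      · rintro ⟨hx, hv⟩
        exact ⟨by tauto, hv⟩
      · rintro ⟨hx, hv⟩
        refine ⟨?_, hv⟩
        rcases hx with h1 | h2 | h3
        · exact Or.inl h1
        · exact absurd (h2 ▸ hc) hv
        · exact Or.inr h3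
    rw [hfs]
    exact Prod.Lex.right _ (by simp)
  · have hc : n ∉ vis := fun hm => h (by simpa using hm)
    apply Prod.Lex.left
    apply Finset.card_lt_card
    refine (Finset.ssubset_iff_of_subset ?_).mpr ⟨n, ?_, ?_⟩
    · intro x hx
      simp only [Finset.mem_sdiff, List.mem_toFinset, List.mem_append, List.mem_cons] at hx ⊢
      rcases hx with ⟨hx1, hx2⟩
      have hx2' : x ∉ vis := fun hm => hx2 ((PySem.Set.mem_add _ _ _).mpr (Or.inl hm))
      refine ⟨?_, hx2'⟩
      rcases hx1 with h1 | h3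
      · exact Or.inl h1
      · exact Or.inl (pvMemGetD dd n x h3)
    · simp only [Finset.mem_sdiff, List.mem_toFinset, List.mem_append, List.mem_cons]
      exact ⟨by tauto, hc⟩
    · simp only [Finset.mem_sdiff, List.mem_toFinset, not_and, not_not]
      intro _
      exact (PySem.Set.mem_add _ _ _).mpr (Or.inr rfl)
  · rename_i f
    have hc : n ∉ vis := fun hm => h (by simpa using hm)
    apply Prod.Lex.left
    apply Finset.card_lt_card
    have hM := (f ⟨(PySem.Dict.mk dd).getD n [], PySem.Set.add vis n⟩ (by
      apply Prod.Lex.left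
      apply Finset.card_lt_card
      refine (Finset.ssubset_iff_of_subset ?_).mpr ⟨n, ?_, ?_⟩
      · intro x hx
        simp only [Finset.mem_sdiff, List.mem_toFinset, List.mem_append, List.mem_cons] at hx ⊢
        rcases hx with ⟨hx1, hx2⟩
        have hx2' : x ∉ vis := fun hm => hx2 ((PySem.Set.mem_add _ _ _).mpr (Or.inl hm))
        refine ⟨?_, hx2'⟩
        rcases hx1 with h1 | h3
        · exact Or.inl h1
        · exact Or.inl (pvMemGetD dd n x h3)
      · simp only [Finset.mem_sdiff, List.mem_toFinset, List.mem_append, List.mem_cons]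
        exact ⟨by tauto, hc⟩
      · simp only [Finset.mem_sdiff, List.mem_toFinset, not_and, not_not]
        intro _
        exact (PySem.Set.mem_add _ _ _).mpr (Or.inr rfl))).property
    refine (Finset.ssubset_iff_of_subset ?_).mpr ⟨n, ?_, ?_⟩
    · intro x hx
      simp only [Finset.mem_sdiff, List.mem_toFinset, List.mem_append, List.mem_cons] at hx ⊢
      rcases hx with ⟨hx1, hx2⟩
      refine ⟨by tauto, fun hm => hx2 (hM x ((PySem.Set.mem_add _ _ _).mpr (Or.inl hm)))⟩
    · simp only [Finset.mem_sdiff, List.mem_toFinset, List.mem_append, List.mem_cons]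
      exact ⟨by tauto, hc⟩
    · simp only [Finset.mem_sdiff, List.mem_toFinset, not_and, not_not]
      intro _
      exact hM n ((PySem.Set.mem_add _ _ _).mpr (Or.inr rfl))

def find_required_modules_py_alt (dependency_graph : List (String × List (String × List String))) (target_module_id : String) : List String :=
  -- dependency_graph['dependencies'] raises KeyError when the key is absent: excluded by Pre_
  let dd := (PySem.Dict.mk dependency_graph).getD "dependencies" []
  -- the Python value is a SET: presented as the sorted list of its distinct elements
  PySem.List.sorted (pvDfs dd [target_module_id] PySem.Set.empty).val (fun x => x) false

-- ===== PRECONDITION & SPEC =====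
-- Pre_ excludes exactly the inputs on which A (and B alike) raises KeyError:
-- dependency_graph has no 'dependencies' key.
def Pre_find_required_modules_py (dependency_graph : List (String × List (String × List String))) (target_module_id : String) : Prop :=
  ((PySem.Dict.mk dependency_graph).get? "dependencies").isSome = true
instance (dependency_graph : List (String × List (String × List String))) (target_module_id : String) : Decidable (Pre_find_required_modules_py dependency_graph target_module_id) := by unfold Pre_find_required_modules_py; infer_instance

def pvWitness_find_required_modules_py : (List (String × List (String × List String))) × String :=
  ([("dependencies", [("a", ["b", "c"]), ("b", ["a"])])], "a")

def Spec_find_required_modules_py (dependency_graph : List (String × List (String × List String))) (target_module_id : String) (out : List String) : Prop := out = find_required_modules_py_alt dependency_graph target_module_id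
instance (dependency_graph : List (String × List (String × List String))) (target_module_id : String) (out : List String) : Decidable (Spec_find_required_modules_py dependency_graph target_module_id out) := by unfold Spec_find_required_modules_py; infer_instance

-- ===== CLAIM (what is proved, stated in full; the proofs are below) =====
def Claim_equal_find_required_modules_py : Prop := ∀ (dependency_graph : List (String × List (String × List String))) (target_module_id : String), Dom_find_required_modules_py dependency_graph target_module_id → Pre_find_required_modules_py dependency_graph target_module_id → Spec_find_required_modules_py dependency_graph target_module_id (find_required_modules_py dependency_graph target_module_id)

-- ===== LEMMAS AND PROOFS =====

-- reachability in the dependency dict, the common characterisation of both results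
inductive pvReach (dd : List (String × List String)) : String → String → Prop
  | refl (a : String) : pvReach dd a a
  | step {a b c : String} : pvReach dd a b → c ∈ (PySem.Dict.mk dd).getD b [] → pvReach dd a c

theorem pvReach_trans {dd : List (String × List String)} {a b c : String}
    (h1 : pvReach dd a b) (h2 : pvReach dd b c) : pvReach dd a c := by
  induction h2 with
  | refl => exact h1
  | step _ hmem ih => exact pvReach.step ih hmem


-- unfolding equations of pvDfs used by the proofs below
theorem pvDfs_nil (dd : List (String × List String)) (vis : PySem.Set String) :
    (pvDfs dd [] vis).val = vis := by
  rw [pvDfs]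

theorem pvDfs_cons_mem (dd : List (String × List String)) (n : String) (rest : List String)
    (vis : PySem.Set String) (h : PySem.Set.contains vis n = true) :
    pvDfs dd (n :: rest) vis = pvDfs dd rest vis := by
  rw [pvDfs, dif_pos h]

theorem pvDfs_cons_not (dd : List (String × List String)) (n : String) (rest : List String)
    (vis : PySem.Set String) (h : ¬ PySem.Set.contains vis n = true) :
    (pvDfs dd (n :: rest) vis).val
      = (pvDfs dd rest (pvDfs dd ((PySem.Dict.mk dd).getD n []) (PySem.Set.add vis n)).val).val := by
  rw [pvDfs, dif_neg h]

-- ---- facts about A's BFS loop ----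
theorem pvLoopA_sub (dd : List (String × List String)) :
    ∀ (queue : List String) (vis req : PySem.Set String), req = vis →
      ∀ x, (x ∈ vis ∨ x ∈ queue) → x ∈ pvLoopA dd queue vis req := by
  intro queue vis req
  induction queue, vis, req using pvLoopA.induct dd with
  | case1 vis req =>
    intro hrv; subst hrv
    rw [pvLoopA]
    rintro x (hx | hx)
    · exact hx
    · exact absurd hx (List.not_mem_nil)
  | case2 current queue vis req h ih =>
    intro hrv; subst hrv
    rw [pvLoopA, if_pos h]
    rintro x (hx | hx)
    · exact ih rfl x (Or.inl hx)
    · rcases List.mem_cons.mp hx with rfl | hx2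
      · exact ih rfl x (Or.inl (by simpa using h))
      · exact ih rfl x (Or.inr hx2)
  | case3 current queue vis req h vis' req' deps ih =>
    intro hrv; subst hrv
    rw [pvLoopA, if_neg h]
    rintro x (hx | hx)
    · exact ih rfl x (Or.inl ((PySem.Set.mem_add _ _ _).mpr (Or.inl hx)))
    · rcases List.mem_cons.mp hx with rfl | hx2
      · exact ih rfl x (Or.inl ((PySem.Set.mem_add _ _ _).mpr (Or.inr rfl)))
      · exact ih rfl x (Or.inr (List.mem_append.mpr (Or.inl hx2)))

theorem pvLoopA_closed (dd : List (String × List String)) :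
    ∀ (queue : List String) (vis req : PySem.Set String), req = vis →
      (∀ v ∈ vis, ∀ d ∈ (PySem.Dict.mk dd).getD v [], d ∈ vis ∨ d ∈ queue) →
      ∀ v ∈ pvLoopA dd queue vis req, ∀ d ∈ (PySem.Dict.mk dd).getD v [],
        d ∈ pvLoopA dd queue vis req := by
  intro queue vis req
  induction queue, vis, req using pvLoopA.induct dd with
  | case1 vis req =>
    intro hrv hinv; subst hrv
    rw [pvLoopA]
    intro v hv d hd
    rcases hinv v hv d hd with h1 | h1
    · exact h1
    · exact absurd h1 (List.not_mem_nil)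
  | case2 current queue vis req h ih =>
    intro hrv hinv; subst hrv
    rw [pvLoopA, if_pos h]
    apply ih rfl
    intro v hv d hd
    rcases hinv v hv d hd with h1 | h1
    · exact Or.inl h1
    · rcases List.mem_cons.mp h1 with rfl | h2
      · exact Or.inl (by simpa using h)
      · exact Or.inr h2
  | case3 current queue vis req h vis' req' deps ih =>
    intro hrv hinv; subst hrv
    rw [pvLoopA, if_neg h]
    apply ih rfl
    intro v hv d hd
    rcases (PySem.Set.mem_add _ _ _).mp hv with hv1 | rfl
    · rcases hinv v hv1 d hd with h1 | h1
      · exact Or.inl ((PySem.Set.mem_add _ _ _).mpr (Or.inl h1))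
      · rcases List.mem_cons.mp h1 with rfl | h2
        · exact Or.inl ((PySem.Set.mem_add _ _ _).mpr (Or.inr rfl))
        · exact Or.inr (List.mem_append.mpr (Or.inl h2))
    · by_cases hdv : d ∈ vis'
      · exact Or.inl hdv
      · refine Or.inr (List.mem_append.mpr (Or.inr ?_))
        exact List.mem_filter.mpr ⟨hd, by simpa using hdv⟩

theorem pvLoopA_min (dd : List (String × List String)) :
    ∀ (queue : List String) (vis req : PySem.Set String), req = vis →
      ∀ x ∈ pvLoopA dd queue vis req, x ∈ vis ∨ ∃ q ∈ queue, pvReach dd q x := by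
  intro queue vis req
  induction queue, vis, req using pvLoopA.induct dd with
  | case1 vis req =>
    intro hrv; subst hrv
    rw [pvLoopA]
    intro x hx
    exact Or.inl hx
  | case2 current queue vis req h ih =>
    intro hrv; subst hrv
    rw [pvLoopA, if_pos h]
    intro x hx
    rcases ih rfl x hx with h1 | ⟨q, hq, hr⟩
    · exact Or.inl h1
    · exact Or.inr ⟨q, List.mem_cons_of_mem _ hq, hr⟩
  | case3 current queue vis req h vis' req' deps ih =>
    intro hrv; subst hrv
    rw [pvLoopA, if_neg h]
    intro x hx
    rcases ih rfl x hx with h1 | ⟨q, hq, hr⟩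
    · rcases (PySem.Set.mem_add _ _ _).mp h1 with h2 | rfl
      · exact Or.inl h2
      · exact Or.inr ⟨x, List.mem_cons_self, pvReach.refl x⟩
    · rcases List.mem_append.mp hq with h2 | h2
      · exact Or.inr ⟨q, List.mem_cons_of_mem _ h2, hr⟩
      · refine Or.inr ⟨current, List.mem_cons_self, ?_⟩
        exact pvReach_trans (pvReach.step (pvReach.refl current) (List.mem_of_mem_filter h2)) hr

theorem pvLoopA_nodup (dd : List (String × List String)) :
    ∀ (queue : List String) (vis req : PySem.Set String), req.Nodup →
      (pvLoopA dd queue vis req).Nodup := by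
  intro queue vis req
  induction queue, vis, req using pvLoopA.induct dd with
  | case1 vis req =>
    intro hn
    rw [pvLoopA]
    exact hn
  | case2 current queue vis req h ih =>
    intro hn
    rw [pvLoopA, if_pos h]
    exact ih hn
  | case3 current queue vis req h vis' req' deps ih =>
    intro hn
    rw [pvLoopA, if_neg h]
    exact ih (PySem.Set.nodup_add _ _ hn)

theorem pvLoopA_mem (dd : List (String × List String)) (t x : String) :
    x ∈ pvLoopA dd [t] PySem.Set.empty PySem.Set.empty ↔ pvReach dd t x := by
  constructor
  · intro hx
    rcases pvLoopA_min dd [t] PySem.Set.empty PySem.Set.empty rfl x hx with h | ⟨q, hq, hr⟩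
    · exact absurd h (List.not_mem_nil)
    · rcases List.mem_singleton.mp hq with rfl
      exact hr
  · intro hr
    induction hr with
    | refl => exact pvLoopA_sub dd [t] _ _ rfl _ (Or.inr (List.mem_singleton.mpr rfl))
    | step _ hmem ih =>
      exact pvLoopA_closed dd [t] PySem.Set.empty PySem.Set.empty rfl
        (fun v hv => absurd hv (List.not_mem_nil)) _ ih _ hmem

-- ---- facts about B's DFS recursion ----
theorem pvDfs_sub (dd : List (String × List String)) :
    ∀ (stack : List String) (vis : PySem.Set String),
      ∀ x, (x ∈ vis ∨ x ∈ stack) → x ∈ (pvDfs dd stack vis).val := by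
  intro stack vis
  induction stack, vis using pvDfs.induct dd with
  | case1 vis =>
    rw [pvDfs_nil]
    rintro x (hx | hx)
    · exact hx
    · exact absurd hx (List.not_mem_nil)
  | case2 n rest vis h ih =>
    rw [pvDfs_cons_mem dd n rest vis h]
    rintro x (hx | hx)
    · exact ih x (Or.inl hx)
    · rcases List.mem_cons.mp hx with rfl | hx2
      · exact ih x (Or.inl (by simpa using h))
      · exact ih x (Or.inr hx2)
  | case3 n rest vis h hinner ih_inner ih_outer ih_outer2 =>
    rw [pvDfs_cons_not dd n rest vis h]
    have hmono := (pvDfs dd ((PySem.Dict.mk dd).getD n []) (PySem.Set.add vis n)).property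
    rintro x (hx | hx)
    · exact ih_outer x (Or.inl (hmono x ((PySem.Set.mem_add _ _ _).mpr (Or.inl hx))))
    · rcases List.mem_cons.mp hx with rfl | hx2
      · exact ih_outer x (Or.inl (hmono x ((PySem.Set.mem_add _ _ _).mpr (Or.inr rfl))))
      · exact ih_outer x (Or.inr hx2)

theorem pvDfs_closed (dd : List (String × List String)) :
    ∀ (stack : List String) (vis : PySem.Set String),
      ∀ v ∈ (pvDfs dd stack vis).val, v ∈ vis ∨
        ∀ d ∈ (PySem.Dict.mk dd).getD v [], d ∈ (pvDfs dd stack vis).val := by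
  intro stack vis
  induction stack, vis using pvDfs.induct dd with
  | case1 vis =>
    rw [pvDfs_nil]
    intro v hv
    exact Or.inl hv
  | case2 n rest vis h ih =>
    rw [pvDfs_cons_mem dd n rest vis h]
    exact ih
  | case3 n rest vis h hinner ih_inner ih_outer ih_outer2 =>
    rw [pvDfs_cons_not dd n rest vis h]
    have hMR := (pvDfs dd rest (pvDfs dd ((PySem.Dict.mk dd).getD n []) (PySem.Set.add vis n)).val).property
    intro v hv
    rcases ih_outer v hv with hvM | hclosed
    · rcases ih_inner v hvM with hva | hclosed2
      · rcases (PySem.Set.mem_add _ _ _).mp hva with hv1 | rfl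
        · exact Or.inl hv1
        · refine Or.inr fun d hd => hMR d ?_
          exact pvDfs_sub dd ((PySem.Dict.mk dd).getD v []) (PySem.Set.add vis v) d (Or.inr hd)
      · exact Or.inr fun d hd => hMR d (hclosed2 d hd)
    · exact Or.inr hclosed

theorem pvDfs_min (dd : List (String × List String)) :
    ∀ (stack : List String) (vis : PySem.Set String),
      ∀ x ∈ (pvDfs dd stack vis).val, x ∈ vis ∨ ∃ s ∈ stack, pvReach dd s x := by
  intro stack vis
  induction stack, vis using pvDfs.induct dd with
  | case1 vis =>
    rw [pvDfs_nil]
    intro x hx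
    exact Or.inl hx
  | case2 n rest vis h ih =>
    rw [pvDfs_cons_mem dd n rest vis h]
    intro x hx
    rcases ih x hx with h1 | ⟨s, hs, hr⟩
    · exact Or.inl h1
    · exact Or.inr ⟨s, List.mem_cons_of_mem _ hs, hr⟩
  | case3 n rest vis h hinner ih_inner ih_outer ih_outer2 =>
    rw [pvDfs_cons_not dd n rest vis h]
    intro x hx
    rcases ih_outer x hx with hxM | ⟨s, hs, hr⟩
    · rcases ih_inner x hxM with hxa | ⟨d, hd, hr⟩
      · rcases (PySem.Set.mem_add _ _ _).mp hxa with h2 | rfl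
        · exact Or.inl h2
        · exact Or.inr ⟨x, List.mem_cons_self, pvReach.refl x⟩
      · refine Or.inr ⟨n, List.mem_cons_self, ?_⟩
        exact pvReach_trans (pvReach.step (pvReach.refl n) hd) hr
    · exact Or.inr ⟨s, List.mem_cons_of_mem _ hs, hr⟩

theorem pvDfs_nodup (dd : List (String × List String)) :
    ∀ (stack : List String) (vis : PySem.Set String), vis.Nodup →
      (pvDfs dd stack vis).val.Nodup := by
  intro stack vis
  induction stack, vis using pvDfs.induct dd with
  | case1 vis =>
    intro hn
    rw [pvDfs_nil]
    exact hn
  | case2 n rest vis h ih =>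
    intro hn
    rw [pvDfs_cons_mem dd n rest vis h]
    exact ih hn
  | case3 n rest vis h hinner ih_inner ih_outer ih_outer2 =>
    intro hn
    rw [pvDfs_cons_not dd n rest vis h]
    exact ih_outer2 (ih_inner (PySem.Set.nodup_add _ _ hn))

theorem pvDfs_mem (dd : List (String × List String)) (t x : String) :
    x ∈ (pvDfs dd [t] PySem.Set.empty).val ↔ pvReach dd t x := by
  constructor
  · intro hx
    rcases pvDfs_min dd [t] PySem.Set.empty x hx with h | ⟨q, hq, hr⟩
    · exact absurd h (List.not_mem_nil)
    · rcases List.mem_singleton.mp hq with rfl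
      exact hr
  · intro hr
    induction hr with
    | refl => exact pvDfs_sub dd [t] _ _ (Or.inr (List.mem_singleton.mpr rfl))
    | step _ hmem ih =>
      rcases pvDfs_closed dd [t] PySem.Set.empty _ ih with h | h
      · exact absurd h (List.not_mem_nil)
      · exact h _ hmem

-- ===== VERDICT (by name: the statement is the Claim_ definition above) =====
theorem find_required_modules_py_spec : Claim_equal_find_required_modules_py := by
  intro g t _ _
  unfold Spec_find_required_modules_py find_required_modules_py find_required_modules_py_alt
  apply PySem.List.sorted_eq_sorted_of_perm _ _ _ (fun a b hab => hab)
  rw [List.perm_ext_iff_of_nodup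
    (pvLoopA_nodup _ [t] PySem.Set.empty PySem.Set.empty List.nodup_nil)
    (pvDfs_nodup _ [t] PySem.Set.empty List.nodup_nil)]
  intro x
  rw [pvLoopA_mem, pvDfs_mem]
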